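-- pv_equiv track=rewrite | github.com/kimwest00/algorithm-practice | P_신고결과받기.py | solution
-- ===== SOURCE A (Python) =====
-- def solution(id_list, report, k):
--     #report 리스트 중복제거
--     #A->B A->B가 여러번 등장해도 어차피 1회로 치니까!
--     n = len(id_list)
--
--     mail = [[] for _ in range(n)]
--     report = list(set(report))
--     for index,key in enumerate(report):
--         key = key.split()
--         #id_list에서 신고받은사람의 index를 찾아낸다
--         warn_index = id_list.index(key[-1])
--         mail[warn_index].append(key[0])
--
--     answer = [0 for _ in range(n)]
--     for index, warn_list in enumerate(mail):
--         if len(warn_list) >= k: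
--             for i in warn_list:
--                 answer[id_list.index(i)] += 1
--     return answer
-- ===== SOURCE B (Python) =====
-- def solution(id_list, report, k):
--     # declarative form: each output entry is computed directly as a count over the
--     # deduped report pairs, with the banned-target set precomputed; no positional
--     # array updates, no per-user mail buckets, no id_list.index scans
--     words = [r.split() for r in set(report)]
--     banned = {w[-1] for w in words
--               if sum(v[-1] == w[-1] for v in words) >= k}
--     return [sum(w[0] == uid and w[-1] in banned for w in words)
--             for uid in id_list]
-- ===== Notes on version B (the rewrite author's own statement) =====
-- stated objective: alternative
-- what changed: Replaces A's imperative build of per-target mail buckets plus a nested ban loop that increments a positional answer array via repeated id_list.index scans by a declarative form: a precomputed banned-target set and one direct count expression per user id over the deduped report pairs (no mutable answer array, no index lookups).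
-- intended difference: On inputs whose id_list contains a duplicated id reporting a target with at least k distinct reports, A credits the report only to the id's first position (an id_list.index artefact, e.g. [1,0,1] on the witness) while B counts it at every position of that id ([1,1,1]); B's is intended since every position names the same user. — e.g. on solution(["a", "a", "b"], ["b a", "a b"], 1): A returns [1, 0, 1], B returns [1, 1, 1]
import Mathlib
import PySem

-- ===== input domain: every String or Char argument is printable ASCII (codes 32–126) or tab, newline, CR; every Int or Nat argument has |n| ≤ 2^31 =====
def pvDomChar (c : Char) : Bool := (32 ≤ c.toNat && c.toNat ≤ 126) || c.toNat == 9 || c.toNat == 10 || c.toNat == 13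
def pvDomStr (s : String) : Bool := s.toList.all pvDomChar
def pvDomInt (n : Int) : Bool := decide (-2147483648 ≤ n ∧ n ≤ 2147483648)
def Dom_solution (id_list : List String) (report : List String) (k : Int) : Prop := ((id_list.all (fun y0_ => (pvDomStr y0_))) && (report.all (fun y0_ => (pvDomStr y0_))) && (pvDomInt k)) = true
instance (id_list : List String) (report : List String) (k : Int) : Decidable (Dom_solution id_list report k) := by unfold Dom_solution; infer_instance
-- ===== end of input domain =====

-- B replaces A's imperative build of per-target mail buckets plus a nested ban loop that
-- increments a positional answer array via id_list.index scans by a declarative form: a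
-- precomputed banned-target set and one direct count per user id over the deduped pairs.
-- On duplicate ids A credits only the first occurrence (an id_list.index artefact); B
-- counts every occurrence (stated as the intended difference D_ below).

-- ===== PORT A =====
def solution (id_list : List String) (report : List String) (k : Int) : List Int :=
  let n := id_list.length
  let mail0 : List (List String) := List.replicate n []
  let report' := PySem.Set.ofList report
  let mail := report'.foldl (fun mail key =>
    let ks := PySem.Str.split₀ key
    match (PySem.List.pyGet? ks (-1)).bind (fun t => PySem.List.index? id_list t) with
    | some warn_index =>
        mail.set warn_index ((mail.getD warn_index []) ++ [PySem.List.pyGetD ks 0 ""])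
    | none => mail) mail0   -- Python raises here (IndexError/ValueError); excluded by Pre_
  let answer0 : List Int := List.replicate n 0
  mail.foldl (fun answer warn_list =>
    if k ≤ (warn_list.length : Int) then
      warn_list.foldl (fun answer i =>
        match PySem.List.index? id_list i with
        | some j => answer.set j ((answer.getD j 0) + 1)
        | none => answer) answer   -- Python raises ValueError here; excluded by Pre_
    else answer) answer0

-- ===== PORT B =====
def solution_alt (id_list : List String) (report : List String) (k : Int) : List Int :=
  let words := (PySem.Set.ofList report).map PySem.Str.split₀
  let banned : PySem.Set String := words.foldl (fun s w =>
    if k ≤ ((words.countP (fun v =>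
          PySem.List.pyGetD v (-1) "" == PySem.List.pyGetD w (-1) "")) : Int)
    then PySem.Set.add s (PySem.List.pyGetD w (-1) "") else s) PySem.Set.empty
  id_list.map (fun uid =>
    ((words.countP (fun w => (PySem.List.pyGetD w 0 "" == uid)
        && PySem.Set.contains banned (PySem.List.pyGetD w (-1) ""))) : Int))

-- ===== PRECONDITION & SPEC =====
-- Pre_ excludes exactly the inputs where A raises: a report whose split is empty
-- (IndexError), a reported user missing from id_list (ValueError), or a reporting user
-- missing from id_list whose target gathered at least k distinct reports (ValueError in
-- the ban loop).
def Pre_solution (id_list : List String) (report : List String) (k : Int) : Prop :=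
  ∀ r ∈ report,
    PySem.Str.split₀ r ≠ [] ∧
    PySem.List.pyGetD (PySem.Str.split₀ r) (-1) "" ∈ id_list ∧
    (PySem.List.pyGetD (PySem.Str.split₀ r) 0 "" ∈ id_list ∨
      ¬ k ≤ (((PySem.Set.ofList report).countP (fun s =>
        PySem.List.pyGetD (PySem.Str.split₀ s) (-1) "" ==
          PySem.List.pyGetD (PySem.Str.split₀ r) (-1) "")) : Int))
instance (id_list : List String) (report : List String) (k : Int) : Decidable (Pre_solution id_list report k) := by unfold Pre_solution; infer_instance
def pvWitness_solution : List String × List String × Int :=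
  (["muzi", "frodo", "apeach", "neo"],
   ["muzi frodo", "apeach frodo", "frodo neo", "muzi neo", "apeach muzi"], 2)

-- On inputs whose id_list contains a duplicated id that is the reporter of some deduped
-- report whose target collected at least k distinct reports, A credits the report only to
-- the FIRST occurrence of that id (an artefact of id_list.index) while B credits every
-- occurrence; B's per-position count is the intended value since each list position names
-- the same user.
def D_solution (id_list : List String) (report : List String) (k : Int) : Prop :=
  ∃ r ∈ PySem.Set.ofList report,
    2 ≤ id_list.count (PySem.List.pyGetD (PySem.Str.split₀ r) 0 "") ∧
    k ≤ (((PySem.Set.ofList report).countP (fun s =>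
      PySem.List.pyGetD (PySem.Str.split₀ s) (-1) "" ==
        PySem.List.pyGetD (PySem.Str.split₀ r) (-1) "")) : Int)
instance (id_list : List String) (report : List String) (k : Int) : Decidable (D_solution id_list report k) := by unfold D_solution; infer_instance

def Spec_solution (id_list : List String) (report : List String) (k : Int) (out : List Int) : Prop := ¬ D_solution id_list report k → out = solution_alt id_list report k
instance (id_list : List String) (report : List String) (k : Int) (out : List Int) : Decidable (Spec_solution id_list report k out) := by unfold Spec_solution; infer_instance

def pvDiffWitness_solution : List String × List String × Int :=
  (["a", "a", "b"], ["b a", "a b"], 1)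
def pvDiffWitnessOut_solution : (List Int) × (List Int) := ([1, 0, 1], [1, 1, 1])

-- ===== CLAIM (what is proved, stated in full; the proofs are below) =====
def Claim_unchanged_solution : Prop := ∀ (id_list : List String) (report : List String) (k : Int), Dom_solution id_list report k → Pre_solution id_list report k → Spec_solution id_list report k (solution id_list report k)
def Claim_changed_solution : Prop := Dom_solution (pvDiffWitness_solution.1) (pvDiffWitness_solution.2.1) (pvDiffWitness_solution.2.2) ∧ Pre_solution (pvDiffWitness_solution.1) (pvDiffWitness_solution.2.1) (pvDiffWitness_solution.2.2) ∧ D_solution (pvDiffWitness_solution.1) (pvDiffWitness_solution.2.1) (pvDiffWitness_solution.2.2) ∧ solution (pvDiffWitness_solution.1) (pvDiffWitness_solution.2.1) (pvDiffWitness_solution.2.2) = pvDiffWitnessOut_solution.1 ∧ solution_alt (pvDiffWitness_solution.1) (pvDiffWitness_solution.2.1) (pvDiffWitness_solution.2.2) = pvDiffWitnessOut_solution.2 ∧ pvDiffWitnessOut_solution.1 ≠ pvDiffWitnessOut_solution.2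
def Claim_exact_solution : Prop := ∀ (id_list : List String) (report : List String) (k : Int), Dom_solution id_list report k → Pre_solution id_list report k → D_solution id_list report k → solution id_list report k ≠ solution_alt id_list report k

-- ===== LEMMAS AND PROOFS =====
def pvT (p : List String) : String := PySem.List.pyGetD p (-1) ""
def pvS (p : List String) : String := PySem.List.pyGetD p 0 ""
def pvTC (P : List (List String)) (b : String) : Nat := P.countP (fun q => pvT q == b)

theorem pv_getD_set (l : List Int) (i j : Nat) (v : Int) :
    (l.set i v).getD j 0 = if i = j ∧ i < l.length then v else l.getD j 0 := by
  rcases Nat.lt_or_ge j (l.length) with h | h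
  · rw [List.getD_eq_getElem?_getD, List.getD_eq_getElem?_getD, List.getElem?_set]
    split_ifs with h1 h2 h3 <;> simp_all
  · rw [List.getD_eq_getElem?_getD, List.getD_eq_getElem?_getD]
    rw [List.getElem?_eq_none (by simpa using h), List.getElem?_eq_none (by omega)]
    have : ¬ (i = j ∧ i < l.length) := by omega
    simp [this]

theorem pv_getD_setL (l : List (List String)) (i j : Nat) (v : List String) :
    (l.set i v).getD j [] = if i = j ∧ i < l.length then v else l.getD j [] := by
  rcases Nat.lt_or_ge j (l.length) with h | h
  · rw [List.getD_eq_getElem?_getD, List.getD_eq_getElem?_getD, List.getElem?_set]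
    split_ifs with h1 h2 h3 <;> simp_all
  · rw [List.getD_eq_getElem?_getD, List.getD_eq_getElem?_getD]
    rw [List.getElem?_eq_none (by simpa using h), List.getElem?_eq_none (by omega)]
    have : ¬ (i = j ∧ i < l.length) := by omega
    simp [this]

theorem pv_mail (id_list : List String) (l : List (List String))
    (hl : ∀ p ∈ l, p ≠ [] ∧ pvT p ∈ id_list) (mail : List (List String))
    (hlen : mail.length = id_list.length) :
    (l.foldl (fun mail p =>
        match (PySem.List.pyGet? p (-1)).bind (fun t => PySem.List.index? id_list t) with
        | some wi => mail.set wi ((mail.getD wi []) ++ [PySem.List.pyGetD p 0 ""])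
        | none => mail) mail).length = id_list.length ∧
    ∀ i, (l.foldl (fun mail p =>
        match (PySem.List.pyGet? p (-1)).bind (fun t => PySem.List.index? id_list t) with
        | some wi => mail.set wi ((mail.getD wi []) ++ [PySem.List.pyGetD p 0 ""])
        | none => mail) mail).getD i []
      = mail.getD i [] ++
        (l.filter (fun p => PySem.List.index? id_list (pvT p) == some i)).map pvS := by
  induction l generalizing mail with
  | nil => simp [hlen]
  | cons p l ih =>
    obtain ⟨hne, hmem⟩ := hl p (List.mem_cons_self)
    have hget : PySem.List.pyGet? p (-1) = some (pvT p) := by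
      rw [PySem.List.pyGet?_neg_one, pvT, PySem.List.pyGetD_neg_one p "" hne]
      exact List.getLast?_eq_some_getLast hne
    obtain ⟨wi, hwi⟩ : ∃ wi, PySem.List.index? id_list (pvT p) = some wi := by
      have := (PySem.List.index?_isSome_iff id_list (pvT p)).mpr hmem
      exact Option.isSome_iff_exists.mp this
    have hwilen : wi < id_list.length := by
      obtain ⟨hk, -, -⟩ := PySem.List.getElem_of_index?_eq_some hwi
      exact hk
    simp only [List.foldl_cons, hget, Option.bind_some, hwi]
    have hS : PySem.List.pyGetD p 0 "" = pvS p := rfl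
    rw [hS]
    set mail' := mail.set wi ((mail.getD wi []) ++ [pvS p]) with hmail'
    have hlen' : mail'.length = id_list.length := by simp [hmail', hlen]
    obtain ⟨ihlen, ihget⟩ := ih (fun q hq => hl q (List.mem_cons_of_mem _ hq)) mail' hlen'
    refine ⟨ihlen, fun i => ?_⟩
    rw [ihget i]
    by_cases hi : wi = i
    · subst hi
      have : mail'.getD wi [] = mail.getD wi [] ++ [pvS p] := by
        rw [hmail', pv_getD_setL]; simp [hlen, hwilen]
      rw [this, List.filter_cons_of_pos (by rw [hwi]; simp), List.map_cons, List.append_assoc]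
      rfl
    · have : mail'.getD i [] = mail.getD i [] := by
        rw [hmail', pv_getD_setL]; simp [hi]
      rw [this, List.filter_cons_of_neg (by rw [hwi]; simp [hi])]

theorem pv_inner (id_list : List String) (wl : List String)
    (hw : ∀ a ∈ wl, a ∈ id_list) (ans : List Int) (hlen : ans.length = id_list.length) :
    (wl.foldl (fun ans a =>
        match PySem.List.index? id_list a with
        | some j => ans.set j ((ans.getD j 0) + 1)
        | none => ans) ans).length = id_list.length ∧
    ∀ j, (wl.foldl (fun ans a =>
        match PySem.List.index? id_list a with
        | some j => ans.set j ((ans.getD j 0) + 1)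
        | none => ans) ans).getD j 0
      = ans.getD j 0 + (wl.countP (fun a => PySem.List.index? id_list a == some j) : Int) := by
  induction wl generalizing ans with
  | nil => simp [hlen]
  | cons a wl ih =>
    obtain ⟨j0, hj0⟩ : ∃ j0, PySem.List.index? id_list a = some j0 :=
      Option.isSome_iff_exists.mp
        ((PySem.List.index?_isSome_iff id_list a).mpr (hw a List.mem_cons_self))
    have hj0len : j0 < id_list.length := by
      obtain ⟨hk, -, -⟩ := PySem.List.getElem_of_index?_eq_some hj0
      exact hk
    simp only [List.foldl_cons, hj0]
    set ans' := ans.set j0 ((ans.getD j0 0) + 1) with hans'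
    have hlen' : ans'.length = id_list.length := by simp [hans', hlen]
    obtain ⟨ihlen, ihget⟩ := ih (fun b hb => hw b (List.mem_cons_of_mem _ hb)) ans' hlen'
    refine ⟨ihlen, fun j => ?_⟩
    rw [ihget j, List.countP_cons]
    by_cases hj : j0 = j
    · subst hj
      have : ans'.getD j0 0 = ans.getD j0 0 + 1 := by
        rw [hans', pv_getD_set]; simp [hlen, hj0len]
      rw [this]
      have : (PySem.List.index? id_list a == some j0) = true := by rw [hj0]; simp
      rw [this]; simp; ring
    · have h1 : ans'.getD j 0 = ans.getD j 0 := by rw [hans', pv_getD_set]; simp [hj]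
      have h2 : (PySem.List.index? id_list a == some j) = false := by rw [hj0]; simp [hj]
      rw [h1, h2]; simp

theorem pv_outer (id_list : List String) (k : Int) (rows : List (List String))
    (hr : ∀ wl ∈ rows, k ≤ (wl.length : Int) → ∀ a ∈ wl, a ∈ id_list) (ans : List Int)
    (hlen : ans.length = id_list.length) :
    ∀ j, (rows.foldl (fun answer warn_list =>
        if k ≤ (warn_list.length : Int) then
          warn_list.foldl (fun answer i =>
            match PySem.List.index? id_list i with
            | some j => answer.set j ((answer.getD j 0) + 1)
            | none => answer) answer
        else answer) ans).getD j 0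
      = ans.getD j 0 +
        ((rows.map (fun wl => if k ≤ (wl.length : Int) then
            (wl.countP (fun a => PySem.List.index? id_list a == some j) : Int) else 0)).sum) := by
  induction rows generalizing ans with
  | nil => simp
  | cons wl rows ih =>
    intro j
    simp only [List.foldl_cons, List.map_cons, List.sum_cons]
    by_cases hk : k ≤ (wl.length : Int)
    · obtain ⟨ilen, iget⟩ := pv_inner id_list wl (hr wl List.mem_cons_self hk) ans hlen
      rw [if_pos hk, ih (fun w hw => hr w (List.mem_cons_of_mem _ hw)) _ ilen j, iget j,
        if_pos hk]
      ring
    · rw [if_neg hk, ih (fun w hw => hr w (List.mem_cons_of_mem _ hw)) ans hlen j, if_neg hk]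
      ring

theorem pv_sum_indicator (n i0 : Nat) (v : Int) :
    ((List.range n).map (fun i => if i0 = i then v else 0)).sum
      = if i0 < n then v else 0 := by
  induction n with
  | zero => simp
  | succ n ih =>
    rw [List.range_succ, List.map_append, List.sum_append, ih]
    by_cases h : i0 = n
    · subst h; simp
    · by_cases h2 : i0 < n <;> simp [h, h2] <;> omega

theorem pv_partition {X : Type} (n : Nat) (P : List X) (f : X → Option Nat)
    (hf : ∀ p ∈ P, ∃ i, f p = some i ∧ i < n) (r : X → Bool) :
    ((List.range n).map (fun i => (P.countP (fun p => (f p == some i) && r p) : Int))).sum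
      = (P.countP r : Int) := by
  induction P with
  | nil => simp
  | cons p P ih =>
    have hbody : (fun i => (((p :: P).countP (fun q => (f q == some i) && r q) : Nat) : Int))
        = fun i => ((P.countP (fun q => (f q == some i) && r q) : Nat) : Int)
          + (if (f p == some i) && r p then 1 else 0) := by
      funext i; rw [List.countP_cons]
      by_cases h : ((f p == some i) && r p) = true <;> simp [h]
    rw [hbody, PySem.List.sum_map_add_int, ih (fun q hq => hf q (List.mem_cons_of_mem _ hq))]
    obtain ⟨i0, hi0, hi0n⟩ := hf p List.mem_cons_self
    have hsingle : ((List.range n).map (fun i => if (f p == some i) && r p then (1:Int) else 0)).sum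
        = if r p then 1 else 0 := by
      by_cases hr : r p
      · have : (fun i => if (f p == some i) && r p then (1:Int) else 0)
            = fun i => if i0 = i then (1:Int) else 0 := by
          funext i; rw [hi0]; by_cases h : i0 = i <;> simp [h, hr]
        rw [this, pv_sum_indicator, if_pos hi0n, if_pos hr]
      · simp [hr]
    rw [hsingle, List.countP_cons]
    by_cases hr : r p <;> simp [hr]

theorem pv_tc_of_idx (id_list : List String)
    (P : List (List String)) (p : List String) (i : Nat)
    (hp : PySem.List.index? id_list (pvT p) = some i) :
    pvTC P (pvT p) = P.countP (fun q => PySem.List.index? id_list (pvT q) == some i) := by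
  obtain ⟨hi, hgi, -⟩ := PySem.List.getElem_of_index?_eq_some hp
  unfold pvTC
  congr 1
  funext q
  by_cases h : pvT q = pvT p
  · rw [h, hp]; simp
  · have hq : PySem.List.index? id_list (pvT q) ≠ some i := by
      intro hc
      obtain ⟨hi', hgq, -⟩ := PySem.List.getElem_of_index?_eq_some hc
      exact h (hgq.symm.trans hgi)
    rw [beq_eq_false_iff_ne.mpr hq, beq_eq_false_iff_ne.mpr h]

theorem pv_rowsum (id_list : List String) (k : Int)
    (P : List (List String)) (hP : ∀ p ∈ P, pvT p ∈ id_list) (j : Nat) :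
    ((List.range id_list.length).map (fun i =>
        if k ≤ (((P.filter (fun p => PySem.List.index? id_list (pvT p) == some i)).map pvS).length : Int) then
          (((P.filter (fun p => PySem.List.index? id_list (pvT p) == some i)).map pvS).countP
              (fun a => PySem.List.index? id_list a == some j) : Int)
        else 0)).sum
      = (P.countP (fun p => (PySem.List.index? id_list (pvS p) == some j)
            && decide (k ≤ (pvTC P (pvT p) : Int))) : Int) := by
  have hterm : ∀ i, (if k ≤ (((P.filter (fun p => PySem.List.index? id_list (pvT p) == some i)).map pvS).length : Int) then
          (((P.filter (fun p => PySem.List.index? id_list (pvT p) == some i)).map pvS).countP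
              (fun a => PySem.List.index? id_list a == some j) : Int)
        else 0)
      = (P.countP (fun p => (PySem.List.index? id_list (pvT p) == some i)
          && ((PySem.List.index? id_list (pvS p) == some j)
              && decide (k ≤ (pvTC P (pvT p) : Int)))) : Int) := by
    intro i
    have hlen : ((P.filter (fun p => PySem.List.index? id_list (pvT p) == some i)).map pvS).length
        = P.countP (fun p => PySem.List.index? id_list (pvT p) == some i) := by
      rw [List.length_map, ← List.countP_eq_length_filter]
    have hcnt : ((P.filter (fun p => PySem.List.index? id_list (pvT p) == some i)).map pvS).countP
          (fun a => PySem.List.index? id_list a == some j)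
        = P.countP (fun p => (PySem.List.index? id_list (pvS p) == some j)
            && (PySem.List.index? id_list (pvT p) == some i)) := by
      rw [List.countP_map, List.countP_filter]
      rfl
    by_cases hk : k ≤ (P.countP (fun p => PySem.List.index? id_list (pvT p) == some i) : Int)
    · rw [if_pos (by rw [hlen]; exact hk), hcnt]
      congr 1
      apply List.countP_congr
      intro p hp
      by_cases ht : PySem.List.index? id_list (pvT p) = some i
      · have : decide (k ≤ (pvTC P (pvT p) : Int)) = true := by
          rw [pv_tc_of_idx id_list P p i ht]; exact decide_eq_true hk
        rw [ht]; simp [this]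
      · rw [beq_eq_false_iff_ne.mpr ht]; simp
    · rw [if_neg (by rw [hlen]; exact hk)]
      have : P.countP (fun p => (PySem.List.index? id_list (pvT p) == some i)
          && ((PySem.List.index? id_list (pvS p) == some j)
              && decide (k ≤ (pvTC P (pvT p) : Int)))) = 0 := by
        rw [List.countP_eq_zero]
        intro p hp
        by_cases ht : PySem.List.index? id_list (pvT p) = some i
        · have : decide (k ≤ (pvTC P (pvT p) : Int)) = false := by
            rw [pv_tc_of_idx id_list P p i ht]; exact decide_eq_false hk
          simp [this]
        · rw [beq_eq_false_iff_ne.mpr ht]; simp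
      rw [this]; simp
  calc ((List.range id_list.length).map (fun i =>
        if k ≤ (((P.filter (fun p => PySem.List.index? id_list (pvT p) == some i)).map pvS).length : Int) then
          (((P.filter (fun p => PySem.List.index? id_list (pvT p) == some i)).map pvS).countP
              (fun a => PySem.List.index? id_list a == some j) : Int)
        else 0)).sum
      = ((List.range id_list.length).map (fun i =>
          (P.countP (fun p => (PySem.List.index? id_list (pvT p) == some i)
            && ((PySem.List.index? id_list (pvS p) == some j)
                && decide (k ≤ (pvTC P (pvT p) : Int)))) : Int))).sum := by
        exact congrArg List.sum (List.map_congr_left (fun i _ => hterm i))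
    _ = (P.countP (fun p => (PySem.List.index? id_list (pvS p) == some j)
            && decide (k ≤ (pvTC P (pvT p) : Int))) : Int) := by
        apply pv_partition
        intro p hp
        obtain ⟨wi, hwi⟩ := Option.isSome_iff_exists.mp
          ((PySem.List.index?_isSome_iff id_list (pvT p)).mpr (hP p hp))
        obtain ⟨hb, -, -⟩ := PySem.List.getElem_of_index?_eq_some hwi
        exact ⟨wi, hwi, hb⟩

theorem pv_outer_len (id_list : List String) (k : Int) (rows : List (List String))
    (hr : ∀ wl ∈ rows, k ≤ (wl.length : Int) → ∀ a ∈ wl, a ∈ id_list) (ans : List Int)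
    (hlen : ans.length = id_list.length) :
    (rows.foldl (fun answer warn_list =>
        if k ≤ (warn_list.length : Int) then
          warn_list.foldl (fun answer i =>
            match PySem.List.index? id_list i with
            | some j => answer.set j ((answer.getD j 0) + 1)
            | none => answer) answer
        else answer) ans).length = id_list.length := by
  induction rows generalizing ans with
  | nil => simpa using hlen
  | cons wl rows ih =>
    simp only [List.foldl_cons]
    by_cases hk : k ≤ (wl.length : Int)
    · obtain ⟨ilen, -⟩ := pv_inner id_list wl (hr wl List.mem_cons_self hk) ans hlen
      rw [if_pos hk]
      exact ih (fun w hw => hr w (List.mem_cons_of_mem _ hw)) _ ilen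
    · rw [if_neg hk]
      exact ih (fun w hw => hr w (List.mem_cons_of_mem _ hw)) ans hlen

theorem pv_getD_replicate {α : Type} (n i : Nat) (a : α) :
    (List.replicate n a).getD i a = a := by
  rw [List.getD_eq_getElem?_getD, List.getElem?_replicate]
  split_ifs <;> simp

theorem pvT_eq (p : List String) : PySem.List.pyGetD p (-1) "" = pvT p := rfl
theorem pvS_eq (p : List String) : PySem.List.pyGetD p 0 "" = pvS p := rfl

-- membership in a conditional set-comprehension fold
theorem pv_banned_mem {X : Type} (C : X → Prop) [DecidablePred C] (f : X → String)
    (l : List X) (s0 : PySem.Set String) (x : String) :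
    (x ∈ l.foldl (fun s w => if C w then PySem.Set.add s (f w) else s) s0)
      ↔ (x ∈ s0 ∨ ∃ w ∈ l, C w ∧ f w = x) := by
  induction l generalizing s0 with
  | nil => simp
  | cons w l ih =>
    simp only [List.foldl_cons]
    by_cases hc : C w
    · rw [if_pos hc, ih, PySem.Set.mem_add]
      constructor
      · rintro (⟨h | h⟩ | ⟨v, hv, hcv, hfv⟩)
        · exact Or.inl h
        · exact Or.inr ⟨w, List.mem_cons_self, hc, h.symm⟩
        · exact Or.inr ⟨v, List.mem_cons_of_mem _ hv, hcv, hfv⟩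
      · rintro (h | ⟨v, hv, hcv, hfv⟩)
        · exact Or.inl (Or.inl h)
        · rcases List.mem_cons.mp hv with rfl | hv
          · exact Or.inl (Or.inr hfv.symm)
          · exact Or.inr ⟨v, hv, hcv, hfv⟩
    · rw [if_neg hc, ih]
      constructor
      · rintro (h | ⟨v, hv, hcv, hfv⟩)
        · exact Or.inl h
        · exact Or.inr ⟨v, List.mem_cons_of_mem _ hv, hcv, hfv⟩
      · rintro (h | ⟨v, hv, hcv, hfv⟩)
        · exact Or.inl h
        · rcases List.mem_cons.mp hv with rfl | hv
          · exact absurd hcv hc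
          · exact Or.inr ⟨v, hv, hcv, hfv⟩

theorem pv_two_le_count (l : List String) (s : String) (i j : Nat)
    (hi : i < l.length) (hj : j < l.length)
    (hish : l[i] = s) (hjs : l[j] = s) (hne : i ≠ j) : 2 ≤ l.count s := by
  rw [← List.duplicate_iff_two_le_count, List.duplicate_iff_exists_distinct_get]
  rcases Nat.lt_or_ge i j with h | h
  · exact ⟨⟨i, hi⟩, ⟨j, hj⟩, h, by simp [hish], by simp [hjs]⟩
  · exact ⟨⟨j, hj⟩, ⟨i, hi⟩, Fin.mk_lt_mk.mpr (by omega), by simp [hjs], by simp [hish]⟩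

-- on an id appearing at most once in id_list, 'index? = some j' is equality with the j-th id
theorem pv_index_count (id_list : List String) (s : String)
    (hcnt : id_list.count s ≤ 1)
    (j : Nat) (hj : j < id_list.length) :
    (PySem.List.index? id_list s == some j) = (s == id_list[j]) := by
  by_cases hm : s ∈ id_list
  · obtain ⟨j', hj'⟩ := Option.isSome_iff_exists.mp
      ((PySem.List.index?_isSome_iff id_list s).mpr hm)
    obtain ⟨hlen2, hg, -⟩ := PySem.List.getElem_of_index?_eq_some hj'
    rw [hj']
    by_cases h : j' = j
    · subst h
      rw [hg]
      simp
    · have hne : s ≠ id_list[j] := by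
        intro hc
        have := pv_two_le_count id_list s j' j hlen2 hj hg hc.symm h
        omega
      simp [h, hne]
  · have h1 : PySem.List.index? id_list s = none := by
      rcases h : PySem.List.index? id_list s with - | j'
      · rfl
      · obtain ⟨hk2, hg2, -⟩ := PySem.List.getElem_of_index?_eq_some h
        exact absurd (hg2 ▸ List.getElem_mem _) hm
    have h2 : s ≠ id_list[j] := fun hc => hm (hc ▸ List.getElem_mem _)
    rw [h1, beq_eq_false_iff_ne.mpr h2]
    rfl

-- the banned set contains a target iff its distinct-report tally reaches k
theorem pv_banned_eq (k : Int) (P : List (List String)) (p : List String) (hp : p ∈ P) :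
    PySem.Set.contains (P.foldl (fun s w =>
        if k ≤ ((P.countP (fun v => pvT v == pvT w)) : Int)
        then PySem.Set.add s (pvT w) else s) PySem.Set.empty) (pvT p)
      = decide (k ≤ (pvTC P (pvT p) : Int)) := by
  by_cases hk : k ≤ (pvTC P (pvT p) : Int)
  · rw [decide_eq_true hk]
    rw [PySem.Set.contains_iff]
    rw [pv_banned_mem (fun w => k ≤ ((P.countP (fun v => pvT v == pvT w)) : Int)) pvT]
    exact Or.inr ⟨p, hp, hk, rfl⟩
  · rw [decide_eq_false hk]
    apply Bool.eq_false_iff.mpr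
    intro hc
    rw [PySem.Set.contains_iff,
      pv_banned_mem (fun w => k ≤ ((P.countP (fun v => pvT v == pvT w)) : Int)) pvT] at hc
    rcases hc with h | ⟨w, -, hcw, hfw⟩
    · simp [PySem.Set.empty] at h
    · exact hk (by rw [← hfw] at hk ⊢; exact hcw)

-- A's membership/tally facts about the deduped split pairs, from Pre_
theorem pv_good (id_list : List String) (report : List String) (k : Int)
    (hpre : ∀ r ∈ report, PySem.Str.split₀ r ≠ [] ∧
      PySem.List.pyGetD (PySem.Str.split₀ r) (-1) "" ∈ id_list ∧
      (PySem.List.pyGetD (PySem.Str.split₀ r) 0 "" ∈ id_list ∨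
        ¬ k ≤ (((PySem.Set.ofList report).countP (fun s =>
          PySem.List.pyGetD (PySem.Str.split₀ s) (-1) "" ==
            PySem.List.pyGetD (PySem.Str.split₀ r) (-1) "")) : Int))) :
    ∀ p ∈ (PySem.Set.ofList report).map PySem.Str.split₀, p ≠ [] ∧ pvT p ∈ id_list ∧
      (pvS p ∈ id_list ∨
        ¬ k ≤ (pvTC ((PySem.Set.ofList report).map PySem.Str.split₀) (pvT p) : Int)) := by
  intro p hp
  rw [List.mem_map] at hp
  obtain ⟨r, hr, rfl⟩ := hp
  have h := hpre r ((PySem.Set.mem_ofList report r).mp hr)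
  refine ⟨h.1, by simpa [pvT_eq] using h.2.1, ?_⟩
  have hc : pvTC ((PySem.Set.ofList report).map PySem.Str.split₀) (pvT (PySem.Str.split₀ r))
      = (PySem.Set.ofList report).countP (fun s =>
          PySem.List.pyGetD (PySem.Str.split₀ s) (-1) "" ==
            PySem.List.pyGetD (PySem.Str.split₀ r) (-1) "") := by
    unfold pvTC
    rw [List.countP_map]
    rfl
  rcases h.2.2 with h1 | h1
  · exact Or.inl (by simpa [pvS_eq] using h1)
  · exact Or.inr (by rw [hc]; exact h1)

-- what A's loops compute, entry by entry
theorem pv_A_getD (id_list : List String) (report : List String) (k : Int)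
    (hpre : ∀ r ∈ report, PySem.Str.split₀ r ≠ [] ∧
      PySem.List.pyGetD (PySem.Str.split₀ r) (-1) "" ∈ id_list ∧
      (PySem.List.pyGetD (PySem.Str.split₀ r) 0 "" ∈ id_list ∨
        ¬ k ≤ (((PySem.Set.ofList report).countP (fun s =>
          PySem.List.pyGetD (PySem.Str.split₀ s) (-1) "" ==
            PySem.List.pyGetD (PySem.Str.split₀ r) (-1) "")) : Int))) :
    (solution id_list report k).length = id_list.length ∧
    ∀ j, (solution id_list report k).getD j 0
      = ((((PySem.Set.ofList report).map PySem.Str.split₀).countP (fun p =>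
          (PySem.List.index? id_list (pvS p) == some j)
            && decide (k ≤ (pvTC ((PySem.Set.ofList report).map PySem.Str.split₀) (pvT p) : Int)))) : Int) := by
  unfold solution
  simp only [pvS_eq]
  set n := id_list.length with hn
  set P := (PySem.Set.ofList report).map PySem.Str.split₀ with hP
  have hgood := pv_good id_list report k hpre
  rw [← hP] at hgood
  have hfoldA : (PySem.Set.ofList report).foldl (fun mail key =>
      match (PySem.List.pyGet? (PySem.Str.split₀ key) (-1)).bind (fun t => PySem.List.index? id_list t) with
      | some warn_index =>
          mail.set warn_index ((mail.getD warn_index []) ++ [pvS (PySem.Str.split₀ key)])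
      | none => mail) (List.replicate n ([] : List String))
      = P.foldl (fun mail p =>
      match (PySem.List.pyGet? p (-1)).bind (fun t => PySem.List.index? id_list t) with
      | some warn_index =>
          mail.set warn_index ((mail.getD warn_index []) ++ [pvS p])
      | none => mail) (List.replicate n ([] : List String)) := by
    rw [hP, List.foldl_map]
  rw [hfoldA]
  obtain ⟨hmlen, hmget⟩ := pv_mail id_list P
    (fun p hp => ⟨(hgood p hp).1, (hgood p hp).2.1⟩) (List.replicate n []) (by simp [hn])
  simp only [pvS_eq] at hmlen hmget
  have hmail_eq : P.foldl (fun mail p =>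
      match (PySem.List.pyGet? p (-1)).bind (fun t => PySem.List.index? id_list t) with
      | some warn_index =>
          mail.set warn_index ((mail.getD warn_index []) ++ [pvS p])
      | none => mail) (List.replicate n ([] : List String))
      = (List.range n).map (fun i =>
          (P.filter (fun p => PySem.List.index? id_list (pvT p) == some i)).map pvS) := by
    apply List.ext_getElem (by rw [hmlen]; simp [hn])
    intro i h1 h2
    rw [List.getElem_map, List.getElem_range]
    rw [← List.getD_eq_getElem _ [] h1, hmget i, pv_getD_replicate]
    simp
  rw [hmail_eq]
  have hrmem : ∀ wl ∈ (List.range n).map (fun i =>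
      (P.filter (fun p => PySem.List.index? id_list (pvT p) == some i)).map pvS),
      k ≤ (wl.length : Int) → ∀ a ∈ wl, a ∈ id_list := by
    intro wl hwl hk a ha
    rw [List.mem_map] at hwl
    obtain ⟨i, -, rfl⟩ := hwl
    rw [List.mem_map] at ha
    obtain ⟨p, hp, rfl⟩ := ha
    rw [List.mem_filter] at hp
    have hidx : PySem.List.index? id_list (pvT p) = some i := by
      have := hp.2; simpa using this
    rcases (hgood p hp.1).2.2 with h1 | h1
    · exact h1
    · exfalso
      apply h1
      rw [pv_tc_of_idx id_list P p i hidx]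
      rw [List.length_map, ← List.countP_eq_length_filter] at hk
      exact hk
  refine ⟨pv_outer_len id_list k _ hrmem _ (by simp [hn]), fun j => ?_⟩
  rw [pv_outer id_list k _ hrmem _ (by simp [hn]) j, pv_getD_replicate, List.map_map]
  have hrw : ((fun wl => if k ≤ (wl.length : Int) then
        ((wl.countP fun a => PySem.List.index? id_list a == some j : Nat) : Int) else 0) ∘
      (fun i => (P.filter (fun p => PySem.List.index? id_list (pvT p) == some i)).map pvS))
      = fun i => if k ≤ (((P.filter (fun p => PySem.List.index? id_list (pvT p) == some i)).map pvS).length : Int) then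
        ((((P.filter (fun p => PySem.List.index? id_list (pvT p) == some i)).map pvS).countP
          fun a => PySem.List.index? id_list a == some j : Nat) : Int) else 0 := rfl
  rw [hrw, pv_rowsum id_list k P (fun p hp => (hgood p hp).2.1) j]
  rw [zero_add]

theorem pv_B_len (id_list : List String) (report : List String) (k : Int) :
    (solution_alt id_list report k).length = id_list.length := by
  unfold solution_alt
  rw [List.length_map]

-- what B's comprehension computes, entry by entry
theorem pv_B_getD (id_list : List String) (report : List String) (k : Int)
    (j : Nat) (hj : j < id_list.length) :
    (solution_alt id_list report k).getD j 0
      = ((((PySem.Set.ofList report).map PySem.Str.split₀).countP (fun p =>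
          (pvS p == id_list[j])
            && decide (k ≤ (pvTC ((PySem.Set.ofList report).map PySem.Str.split₀) (pvT p) : Int)))) : Int) := by
  unfold solution_alt
  simp only [pvT_eq, pvS_eq]
  set P := (PySem.Set.ofList report).map PySem.Str.split₀ with hP
  rw [List.getD_eq_getElem _ 0 (by rw [List.length_map]; exact hj), List.getElem_map]
  congr 1
  apply List.countP_congr
  intro p hp
  rw [pv_banned_eq k P p hp]

theorem main_spec (id_list : List String) (report : List String) (k : Int)
    (hnD : ¬ D_solution id_list report k)
    (hpre : ∀ r ∈ report, PySem.Str.split₀ r ≠ [] ∧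
      PySem.List.pyGetD (PySem.Str.split₀ r) (-1) "" ∈ id_list ∧
      (PySem.List.pyGetD (PySem.Str.split₀ r) 0 "" ∈ id_list ∨
        ¬ k ≤ (((PySem.Set.ofList report).countP (fun s =>
          PySem.List.pyGetD (PySem.Str.split₀ s) (-1) "" ==
            PySem.List.pyGetD (PySem.Str.split₀ r) (-1) "")) : Int))) :
    solution id_list report k = solution_alt id_list report k := by
  set P := (PySem.Set.ofList report).map PySem.Str.split₀ with hP
  obtain ⟨hAlen, hAget⟩ := pv_A_getD id_list report k hpre
  rw [← hP] at hAget
  have hcount : ∀ p ∈ P, k ≤ (pvTC P (pvT p) : Int) → id_list.count (pvS p) ≤ 1 := by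
    intro p hp hk
    by_contra hge
    apply hnD
    rw [hP, List.mem_map] at hp
    obtain ⟨r, hr, rfl⟩ := hp
    have hc : pvTC P (pvT (PySem.Str.split₀ r))
        = (PySem.Set.ofList report).countP (fun s =>
            PySem.List.pyGetD (PySem.Str.split₀ s) (-1) "" ==
              PySem.List.pyGetD (PySem.Str.split₀ r) (-1) "") := by
      unfold pvTC
      rw [hP, List.countP_map]
      rfl
    exact ⟨r, hr, by rw [pvS_eq]; omega, by rw [← hc]; exact hk⟩
  apply List.ext_getElem (by rw [hAlen, pv_B_len])
  intro j h1 h2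
  have hjn : j < id_list.length := by rw [hAlen] at h1; exact h1
  rw [← List.getD_eq_getElem _ 0 h1, ← List.getD_eq_getElem _ 0 h2]
  rw [hAget j, pv_B_getD id_list report k j hjn, ← hP]
  congr 1
  apply List.countP_congr
  intro p hp
  by_cases hk : k ≤ (pvTC P (pvT p) : Int)
  · rw [pv_index_count id_list (pvS p) (hcount p hp hk) j hjn]
  · rw [decide_eq_false hk]
    simp

-- ===== VERDICT (by name: the statement is the Claim_ definition above) =====
theorem solution_spec : Claim_unchanged_solution := by
  intro id_list report k _hdom hpre
  unfold Spec_solution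
  intro hnD
  exact main_spec id_list report k hnD hpre

theorem solution_changed : Claim_changed_solution := by
  unfold Claim_changed_solution; decide

theorem solution_tight : Claim_exact_solution := by
  intro id_list report k _hdom hpre hd
  obtain ⟨r, hr, hcnt2, hkc⟩ := hd
  set P := (PySem.Set.ofList report).map PySem.Str.split₀ with hP
  have hp0 : PySem.Str.split₀ r ∈ P := by
    rw [hP]
    exact List.mem_map_of_mem hr
  have hc : pvTC P (pvT (PySem.Str.split₀ r))
      = (PySem.Set.ofList report).countP (fun s =>
          PySem.List.pyGetD (PySem.Str.split₀ s) (-1) "" ==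
            PySem.List.pyGetD (PySem.Str.split₀ r) (-1) "") := by
    unfold pvTC
    rw [hP, List.countP_map]
    rfl
  have hk : k ≤ (pvTC P (pvT (PySem.Str.split₀ r)) : Int) := by rw [hc]; exact hkc
  rw [show PySem.List.pyGetD (PySem.Str.split₀ r) 0 "" = pvS (PySem.Str.split₀ r) from rfl] at hcnt2
  obtain ⟨nF, mF, hnm, hh1, hh2⟩ :=
    List.duplicate_iff_exists_distinct_get.mp (List.duplicate_iff_two_le_count.mpr hcnt2)
  have hmlen : (mF : Nat) < id_list.length := mF.isLt
  have hgn : id_list[(nF : Nat)] = pvS (PySem.Str.split₀ r) := by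
    have := hh1; simp [List.get_eq_getElem] at this; exact this.symm
  have hgm : id_list[(mF : Nat)] = pvS (PySem.Str.split₀ r) := by
    have := hh2; simp [List.get_eq_getElem] at this; exact this.symm
  obtain ⟨hAlen, hAget⟩ := pv_A_getD id_list report k hpre
  rw [← hP] at hAget
  have hA0 : (solution id_list report k).getD (mF : Nat) 0 = 0 := by
    rw [hAget (mF : Nat)]
    have hz : P.countP (fun p => (PySem.List.index? id_list (pvS p) == some (mF : Nat))
        && decide (k ≤ (pvTC P (pvT p) : Int))) = 0 := by
      rw [List.countP_eq_zero]
      intro p hp hcontra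
      have hidx : PySem.List.index? id_list (pvS p) = some (mF : Nat) := by
        have := (Bool.and_eq_true _ _).mp hcontra |>.1
        exact beq_iff_eq.mp this
      obtain ⟨hml, hgp, hmin⟩ := PySem.List.getElem_of_index?_eq_some hidx
      have : id_list[(nF : Nat)] ≠ pvS p := hmin (nF : Nat) hnm
      apply this
      rw [hgn, ← hgm, hgp]
    rw [hz]
    rfl
  have hB1 : 1 ≤ (solution_alt id_list report k).getD (mF : Nat) 0 := by
    rw [pv_B_getD id_list report k (mF : Nat) hmlen, ← hP]
    have hpos : 0 < P.countP (fun p => (pvS p == id_list[(mF : Nat)])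
        && decide (k ≤ (pvTC P (pvT p) : Int))) := by
      apply Nat.pos_of_ne_zero
      intro h0
      exact (List.countP_eq_zero.mp h0) _ hp0
        (by rw [Bool.and_eq_true]; exact ⟨beq_iff_eq.mpr hgm.symm, decide_eq_true hk⟩)
    omega
  intro heq
  rw [heq] at hA0
  rw [hA0] at hB1
  omega
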